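-- pv_equiv track=rewrite | github.com/nikhilpolpakkara/MN_Colab | Streamlit/DBOps/TxtOps.py | split_lines_by_end
-- ===== SOURCE A (Python) =====
-- def split_lines_by_end(lines, keyword):
--     blocks = []
--     current_block = []
--
--     for line in lines:
--         current_block.append(line.strip())
--         if line.startswith(keyword):
--             blocks.append(current_block)
--             current_block = []
--
--     return blocks
-- ===== SOURCE B (Python) =====
-- def split_lines_by_end(lines, keyword):
--     # two-phase: find the boundary indices first, then cut the list into slices
--     ends = [i for i, line in enumerate(lines) if line.startswith(keyword)]
--     blocks = []
--     start = 0
--     for idx in ends: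
--         blocks.append([l.strip() for l in lines[start:idx + 1]])
--         start = idx + 1
--     return blocks
-- ===== Notes on version B (the rewrite author's own statement) =====
-- stated objective: alternative
-- what changed: replaces the running-buffer flush loop with a two-phase shape: one pass collects the boundary indices (lines starting with the keyword), then the result is built by slicing between consecutive boundaries; the unterminated tail is simply never sliced
import Mathlib
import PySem

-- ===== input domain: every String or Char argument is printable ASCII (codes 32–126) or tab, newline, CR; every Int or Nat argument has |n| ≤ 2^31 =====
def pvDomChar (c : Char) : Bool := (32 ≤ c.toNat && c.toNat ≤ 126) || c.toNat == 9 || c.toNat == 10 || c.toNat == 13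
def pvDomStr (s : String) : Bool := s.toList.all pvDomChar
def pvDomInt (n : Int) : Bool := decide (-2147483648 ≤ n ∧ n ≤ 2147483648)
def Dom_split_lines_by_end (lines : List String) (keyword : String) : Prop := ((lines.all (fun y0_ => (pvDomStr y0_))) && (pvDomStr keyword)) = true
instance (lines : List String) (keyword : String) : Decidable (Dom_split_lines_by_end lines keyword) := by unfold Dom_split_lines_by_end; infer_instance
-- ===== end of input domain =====

-- B replaces A's running-buffer flush loop with a two-phase shape (collect boundary
-- indices, then slice between consecutive boundaries); same cost, alternative structure.

-- ===== PORT A =====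
def split_lines_by_end (lines : List String) (keyword : String) : List (List String) :=
  (lines.foldl
    (fun (s : List (List String) × List String) line =>
      let cur := s.2 ++ [PySem.Str.strip line]
      if PySem.Str.startswith line keyword then (s.1 ++ [cur], ([] : List String))
      else (s.1, cur))
    (([] : List (List String)), ([] : List String))).1

-- ===== PORT B =====
def split_lines_by_end_alt (lines : List String) (keyword : String) : List (List String) :=
  let ends : List Int :=
    ((PySem.List.enumerate lines 0).filter
      (fun p => PySem.Str.startswith p.2 keyword)).map (fun p => p.1)
  (ends.foldl
    (fun (s : List (List String) × Int) idx =>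
      (s.1 ++ [(PySem.List.slice lines (some s.2) (some (idx + 1))).map PySem.Str.strip],
       idx + 1))
    (([] : List (List String)), (0 : Int))).1

-- ===== PRECONDITION & SPEC =====
def Spec_split_lines_by_end (lines : List String) (keyword : String) (out : List (List String)) : Prop := out = split_lines_by_end_alt lines keyword
instance (lines : List String) (keyword : String) (out : List (List String)) : Decidable (Spec_split_lines_by_end lines keyword out) := by unfold Spec_split_lines_by_end; infer_instance

-- ===== CLAIM (what is proved, stated in full; the proofs are below) =====
def Claim_equal_split_lines_by_end : Prop := ∀ (lines : List String) (keyword : String), Dom_split_lines_by_end lines keyword → Spec_split_lines_by_end lines keyword (split_lines_by_end lines keyword)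

-- ===== LEMMAS AND PROOFS =====

-- common reference function: structural recursion with the pending (already stripped) block
def pvGo (keyword : String) (cur : List String) : List String → List (List String)
  | [] => []
  | l :: rest =>
      if PySem.Str.startswith l keyword then (cur ++ [PySem.Str.strip l]) :: pvGo keyword [] rest
      else pvGo keyword (cur ++ [PySem.Str.strip l]) rest

-- A's fold equals pvGo
theorem pvA_go (keyword : String) :
    ∀ (lines : List String) (blocks : List (List String)) (cur : List String),
      (lines.foldl
        (fun (s : List (List String) × List String) line =>
          let cur := s.2 ++ [PySem.Str.strip line]
          if PySem.Str.startswith line keyword then (s.1 ++ [cur], ([] : List String))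
          else (s.1, cur))
        (blocks, cur)).1 = blocks ++ pvGo keyword cur lines := by
  intro lines
  induction lines with
  | nil => intro blocks cur; simp [pvGo]
  | cons l rest ih =>
      intro blocks cur
      simp only [List.foldl_cons, pvGo]
      by_cases h : PySem.Str.startswith l keyword
      · simp only [h, if_true, ih]
        simp
      · simp only [h, Bool.false_eq_true, if_false, ih]

-- B's two-phase fold equals pvGo: invariant over the processed prefix done ++ pending,
-- where start = done.length and the pending block is pending.map strip
theorem pvB_go (keyword : String) :
    ∀ (rest done pending : List String) (blocks : List (List String)),
      ((((PySem.List.enumerate rest ((done.length + pending.length : Nat) : Int)).filter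
          (fun p => PySem.Str.startswith p.2 keyword)).map (fun p => p.1)).foldl
        (fun (s : List (List String) × Int) idx =>
          (s.1 ++ [(PySem.List.slice (done ++ pending ++ rest) (some s.2) (some (idx + 1))).map PySem.Str.strip],
           idx + 1))
        (blocks, ((done.length : Nat) : Int))).1
      = blocks ++ pvGo keyword (pending.map PySem.Str.strip) rest := by
  intro rest
  induction rest with
  | nil => intro done pending blocks; simp [pvGo, PySem.List.enumerate]
  | cons l rs ih =>
      intro done pending blocks
      rw [PySem.List.enumerate_cons]
      by_cases h : PySem.Str.startswith l keyword
      · -- boundary line: emit slice done.length .. done.length+pending.length+1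
        simp only [List.filter_cons, h, pvGo, if_true, List.map_cons, List.foldl_cons]
        have hb : ((done.length + pending.length : Nat) : Int) + 1
            = (((done.length + pending.length + 1 : Nat)) : Int) := by push_cast; ring
        rw [hb, PySem.List.slice_natCast]
        have hdrop : (done ++ pending ++ l :: rs).drop done.length = pending ++ l :: rs := by
          rw [List.append_assoc, List.drop_left]
        have htake : (pending ++ l :: rs).take (done.length + pending.length + 1 - done.length)
            = pending ++ [l] := by
          have : done.length + pending.length + 1 - done.length = pending.length + 1 := by omega
          rw [this, List.take_append]
          simp
        rw [hdrop, htake]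
        have ihs := ih (done ++ pending ++ [l]) [] (blocks ++ [(pending ++ [l]).map PySem.Str.strip])
        have hlen : ((done ++ pending ++ [l]).length : Int)
            = ((done.length + pending.length : Nat) : Int) + 1 := by
          simp [List.length_append]; push_cast; ring
        have hlen' : (((done ++ pending ++ [l]).length + ([] : List String).length : Nat) : Int)
            = ((done.length + pending.length : Nat) : Int) + 1 := by
          simpa using hlen
        rw [hlen, hlen'] at ihs
        simp only [List.append_assoc, List.cons_append, List.nil_append,
          List.map_nil, List.map_append, List.map_cons] at ihs ⊢
        exact ihs
      · -- non-boundary line: it joins the pending block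
        simp only [List.filter_cons, h, pvGo]
        have ihs := ih done (pending ++ [l]) blocks
        have hlen : (((done.length + (pending ++ [l]).length : Nat)) : Int)
            = ((done.length + pending.length : Nat) : Int) + 1 := by
          simp [List.length_append]; push_cast; ring
        rw [hlen] at ihs
        simp only [List.append_assoc, List.cons_append, List.nil_append,
          List.map_append, List.map_cons, Bool.false_eq_true, if_false] at ihs ⊢
        exact ihs

-- ===== VERDICT (by name: the statement is the Claim_ definition above) =====
theorem split_lines_by_end_spec : Claim_equal_split_lines_by_end := by
  intro lines keyword _
  unfold Spec_split_lines_by_end split_lines_by_end split_lines_by_end_alt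
  have hA := pvA_go keyword lines [] []
  have hB := pvB_go keyword lines [] [] []
  simp only [List.nil_append, List.length_nil, Nat.add_zero, Nat.cast_zero, List.map_nil] at hA hB
  rw [hA, ← hB]
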